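-- pv_equiv track=rewrite | github.com/kkad2176/IA-CARE | app.py | get_classe
-- ===== SOURCE A (Python) =====
-- def get_classe(atc, classe_map):
--     if not atc:
--         return "Inconnue"
--
--     atc = str(atc).upper().strip()
--
--     # 1. match exact
--     if atc in classe_map:
--         return classe_map[atc]
--
--     # 2. fallback par préfixe (A10BJ06 → A10BJ)
--     for i in range(len(atc), 2, -1):
--         prefix = atc[:i]
--         if prefix in classe_map:
--             return classe_map[prefix]
--
--     # 3. fallback logique
--     if atc.startswith("A10"):
--         return "Antidiabétique"
--
--     return "Inconnue"
-- ===== SOURCE B (Python) =====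
-- def get_classe(atc, classe_map):
--     if not atc:
--         return "Inconnue"
--
--     atc = str(atc).upper().strip()
--
--     # exact match
--     if atc in classe_map:
--         return classe_map[atc]
--
--     # longest prefix key (length >= 3) found in ONE scan over the map items
--     best = None  # (key, value) with the longest matching key so far
--     for k, v in classe_map.items():
--         if len(k) >= 3 and atc.startswith(k) and (best is None or len(best[0]) < len(k)):
--             best = (k, v)
--     if best is not None:
--         return best[1]
--
--     if atc.startswith("A10"):
--         return "Antidiabétique"
--     return "Inconnue"
-- ===== Notes on version B (the rewrite author's own statement) =====
-- stated objective: faster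
-- what changed: Replaces the countdown over prefix lengths (len..3, one dict lookup hashing each prefix) by a single scan over the map items that keeps the longest key of length >= 3 prefixing the code; same guard, normalization, exact lookup and fallbacks.
import Mathlib
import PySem

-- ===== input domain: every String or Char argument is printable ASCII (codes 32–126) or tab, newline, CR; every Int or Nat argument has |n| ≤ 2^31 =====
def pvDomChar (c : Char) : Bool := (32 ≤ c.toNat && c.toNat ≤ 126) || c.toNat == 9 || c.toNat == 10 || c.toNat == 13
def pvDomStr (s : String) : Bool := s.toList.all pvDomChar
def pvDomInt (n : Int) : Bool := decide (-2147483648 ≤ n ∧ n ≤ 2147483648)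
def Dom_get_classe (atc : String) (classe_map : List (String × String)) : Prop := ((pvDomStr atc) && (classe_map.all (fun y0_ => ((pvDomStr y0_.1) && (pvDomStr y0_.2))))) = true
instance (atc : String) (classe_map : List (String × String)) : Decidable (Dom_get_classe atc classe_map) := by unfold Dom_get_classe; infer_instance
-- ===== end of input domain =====

-- B replaces A's countdown over prefix lengths by a single scan over the map items keeping
-- the longest prefix key of length ≥ 3 (same guard, normalization, exact lookup, fallbacks).


-- ===== PORT A =====
-- 'atc in classe_map' / 'classe_map[atc]' on the association list: first pair whose key equals s
def pvLookup (m : List (String × String)) (s : List Char) : Option String :=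
  match m with
  | [] => none
  | (k, v) :: rest => if k.toList = s then some v else pvLookup rest s

-- 'for i in range(len(atc), 2, -1): if atc[:i] in classe_map: return classe_map[atc[:i]]'
-- i counts down n, n-1, …, 3; atc[:i] with 0 ≤ i is exactly List.take i.
def pvLoopA (m : List (String × String)) (s : List Char) : Nat → Option String
  | 0 => none
  | n + 1 =>
    if n + 1 ≤ 2 then none
    else
      match pvLookup m (s.take (n + 1)) with
      | some v => some v
      | none => pvLoopA m s n

def get_classe (atc : String) (classe_map : List (String × String)) : String :=
  if atc.toList = [] then "Inconnue"
  else
    let s := PySem.Chars.strip (PySem.Chars.upper atc.toList)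
    match pvLookup classe_map s with
    | some v => v
    | none =>
      match pvLoopA classe_map s s.length with
      | some v => v
      | none =>
        if PySem.Chars.startswith s ['A', '1', '0'] then "Antidiabétique" else "Inconnue"

-- ===== PORT B =====
-- 'best is None or len(best[0]) < len(k)'
def pvBeats (best : Option (List Char × String)) (kl : List Char) : Bool :=
  match best with
  | none => true
  | some b => decide (b.1.length < kl.length)

-- the loop body of Source B's single scan
def pvStep (s : List Char) (best : Option (List Char × String)) (kv : String × String) :
    Option (List Char × String) :=
  let kl := kv.1.toList
  if decide (3 ≤ kl.length) && PySem.Chars.startswith s kl && pvBeats best kl then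
    some (kl, kv.2)
  else best

-- the single scan of Source B: keep the longest key of length ≥ 3 that prefixes s
def pvFoldB (s : List Char) (m : List (String × String)) : Option (List Char × String) :=
  m.foldl (pvStep s) none

def get_classe_alt (atc : String) (classe_map : List (String × String)) : String :=
  if atc.toList = [] then "Inconnue"
  else
    let s := PySem.Chars.strip (PySem.Chars.upper atc.toList)
    match pvLookup classe_map s with
    | some v => v
    | none =>
      match pvFoldB s classe_map with
      | some b => b.2
      | none =>
        if PySem.Chars.startswith s ['A', '1', '0'] then "Antidiabétique" else "Inconnue"

-- ===== PRECONDITION & SPEC =====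
def Spec_get_classe (atc : String) (classe_map : List (String × String)) (out : String) : Prop := out = get_classe_alt atc classe_map
instance (atc : String) (classe_map : List (String × String)) (out : String) : Decidable (Spec_get_classe atc classe_map out) := by unfold Spec_get_classe; infer_instance

-- ===== CLAIM (what is proved, stated in full; the proofs are below) =====
def Claim_equal_get_classe : Prop := ∀ (atc : String) (classe_map : List (String × String)), Dom_get_classe atc classe_map → Spec_get_classe atc classe_map (get_classe atc classe_map)

-- ===== LEMMAS AND PROOFS =====

-- the pairs of m whose key (as a char list) has length ≥ 3 and prefixes s, in order
def pvG (s : List Char) : List (String × String) → List (List Char × String)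
  | [] => []
  | (k, v) :: rest =>
    if 3 ≤ k.toList.length ∧ k.toList <+: s then (k.toList, v) :: pvG s rest else pvG s rest

-- reference selector: first element of maximal key length (strict update keeps the first)
def pvPickMax (acc : Option (List Char × String)) : List (List Char × String) → Option (List Char × String)
  | [] => acc
  | g :: rest => pvPickMax (if pvBeats acc g.1 then some g else acc) rest

theorem pvG_cons_pos {s : List Char} {k v : String} (rest : List (String × String))
    (hc : 3 ≤ k.toList.length ∧ k.toList <+: s) :
    pvG s ((k, v) :: rest) = (k.toList, v) :: pvG s rest := by
  rw [pvG, if_pos hc]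

theorem pvG_cons_neg {s : List Char} {k v : String} (rest : List (String × String))
    (hc : ¬ (3 ≤ k.toList.length ∧ k.toList <+: s)) :
    pvG s ((k, v) :: rest) = pvG s rest := by
  rw [pvG, if_neg hc]

theorem pvG_mem {s : List Char} {m : List (String × String)} {g : List Char × String}
    (h : g ∈ pvG s m) : 3 ≤ g.1.length ∧ g.1 <+: s := by
  induction m with
  | nil => simp [pvG] at h
  | cons kv rest ih =>
    obtain ⟨k, v⟩ := kv
    by_cases hc : 3 ≤ k.toList.length ∧ k.toList <+: s
    · rw [pvG_cons_pos rest hc, List.mem_cons] at h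
      rcases h with h | h
      · subst h; exact hc
      · exact ih h
    · rw [pvG_cons_neg rest hc] at h
      exact ih h

theorem pvStep_eq (s : List Char) (acc : Option (List Char × String)) (k v : String) :
    pvStep s acc (k, v) =
      if 3 ≤ k.toList.length ∧ k.toList <+: s then
        (if pvBeats acc k.toList = true then some (k.toList, v) else acc)
      else acc := by
  have hshow : pvStep s acc (k, v) =
      if (decide (3 ≤ k.toList.length) && PySem.Chars.startswith s k.toList
          && pvBeats acc k.toList) = true then some (k.toList, v) else acc := rfl
  rw [hshow]
  by_cases hc : 3 ≤ k.toList.length ∧ k.toList <+: s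
  · rw [if_pos hc]
    rw [decide_eq_true hc.1, (PySem.Chars.startswith_iff s k.toList).mpr hc.2]
    simp only [Bool.true_and]
  · rw [if_neg hc]
    rcases Decidable.not_and_iff_or_not.mp hc with h | h
    · rw [decide_eq_false h]
      simp only [Bool.false_and, Bool.false_eq_true, if_false]
    · have hsw : PySem.Chars.startswith s k.toList = false := by
        rw [← Bool.not_eq_true]
        exact fun hh => h ((PySem.Chars.startswith_iff s k.toList).mp hh)
      rw [hsw]
      simp only [Bool.and_false, Bool.false_and, Bool.false_eq_true, if_false]

theorem pvFoldB_eq_pickMax (s : List Char) (m : List (String × String)) :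
    ∀ acc, List.foldl (pvStep s) acc m = pvPickMax acc (pvG s m) := by
  induction m with
  | nil => intro acc; rfl
  | cons kv rest ih =>
    intro acc
    obtain ⟨k, v⟩ := kv
    rw [List.foldl_cons, pvStep_eq]
    by_cases hc : 3 ≤ k.toList.length ∧ k.toList <+: s
    · rw [if_pos hc, pvG_cons_pos rest hc]
      rw [show pvPickMax acc ((k.toList, v) :: pvG s rest)
            = pvPickMax (if pvBeats acc (k.toList, v).1 = true then some (k.toList, v) else acc)
                (pvG s rest) from rfl]
      exact ih _
    · rw [if_neg hc, pvG_cons_neg rest hc]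
      exact ih acc

-- once the accumulator is at least as long as everything remaining, it stays
theorem pvPickMax_keep {H : List (List Char × String)} {b : List Char × String}
    (hall : ∀ g ∈ H, g.1.length ≤ b.1.length) : pvPickMax (some b) H = some b := by
  induction H with
  | nil => rfl
  | cons g rest ih =>
    have hfalse : pvBeats (some b) g.1 = false := by
      simp [pvBeats, Nat.not_lt.mpr (hall g (by simp))]
    rw [show pvPickMax (some b) (g :: rest)
          = pvPickMax (if pvBeats (some b) g.1 = true then some g else some b) rest from rfl,
        hfalse, if_neg (by simp)]
    exact ih (fun g hg => hall g (List.mem_cons_of_mem _ hg))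

-- if L is attained and bounds all lengths, pvPickMax returns the FIRST element of length L
theorem pvPickMax_eq_find {H : List (List Char × String)} {L : Nat}
    (hub : ∀ g ∈ H, g.1.length ≤ L) (hex : ∃ g ∈ H, g.1.length = L) :
    ∀ acc, (∀ b, acc = some b → b.1.length < L) →
      pvPickMax acc H = H.find? (fun g => g.1.length == L) := by
  induction H with
  | nil => rcases hex with ⟨g, hg, _⟩; simp at hg
  | cons h rest ih =>
    intro acc hacc
    rw [show pvPickMax acc (h :: rest)
          = pvPickMax (if pvBeats acc h.1 = true then some h else acc) rest from rfl]
    by_cases hL : h.1.length = L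
    · have hb : pvBeats acc h.1 = true := by
        cases acc with
        | none => rfl
        | some b => simp [pvBeats, hL ▸ hacc b rfl]
      rw [hb, if_pos rfl]
      rw [pvPickMax_keep (fun g hg => hL ▸ hub g (List.mem_cons_of_mem _ hg))]
      rw [List.find?_cons_of_pos (by simp only [beq_iff_eq]; exact hL)]
    · have hlt : h.1.length < L := lt_of_le_of_ne (hub h (by simp)) hL
      have hex' : ∃ g ∈ rest, g.1.length = L := by
        rcases hex with ⟨g, hg, hgl⟩
        rcases List.mem_cons.mp hg with h' | h'
        · exact absurd (h' ▸ hgl) hL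
        · exact ⟨g, h', hgl⟩
      rw [ih (fun g hg => hub g (List.mem_cons_of_mem _ hg)) hex' _ ?_]
      · rw [List.find?_cons_of_neg (by simp only [beq_iff_eq]; exact hL)]
      · intro b hb
        split at hb
        · exact (Option.some.inj hb) ▸ hlt
        · exact hacc b hb

-- find? through a filter whose predicate is implied by the searched one
theorem pvFind?_filter {α : Type} {l : List α} {p q : α → Bool}
    (h : ∀ a, p a = true → q a = true) : (l.filter q).find? p = l.find? p := by
  induction l with
  | nil => rfl
  | cons a rest ih =>
    by_cases hp : p a = true
    · rw [List.filter_cons_of_pos (h a hp), List.find?_cons_of_pos hp,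
          List.find?_cons_of_pos hp]
    · have hp' : ¬ p a = true := hp
      by_cases hq : q a = true
      · rw [List.filter_cons_of_pos hq, List.find?_cons_of_neg hp',
            List.find?_cons_of_neg hp']
        exact ih
      · rw [List.filter_cons_of_neg (by simpa using hq), List.find?_cons_of_neg hp']
        exact ih

-- pvLookup m (s.take i) scans m for keys equal to the (unique) prefix of s of length i:
-- it is the first element of pvG s m whose key length is i  (3 ≤ i ≤ |s|)
theorem pvLookup_take {s : List Char} (m : List (String × String)) {i : Nat}
    (h3 : 3 ≤ i) (hle : i ≤ s.length) :
    pvLookup m (s.take i) =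
      ((pvG s m).find? (fun g => g.1.length == i)).map (·.2) := by
  induction m with
  | nil => rfl
  | cons kv rest ih =>
    obtain ⟨k, v⟩ := kv
    by_cases heq : k.toList = s.take i
    · have hpre : k.toList <+: s := heq ▸ List.take_prefix i s
      have hlen : k.toList.length = i := by
        rw [heq, List.length_take]; omega
      have hc : 3 ≤ k.toList.length ∧ k.toList <+: s := ⟨hlen ▸ h3, hpre⟩
      rw [pvLookup, if_pos heq, pvG_cons_pos rest hc,
          List.find?_cons_of_pos (by simp only [beq_iff_eq]; exact hlen)]
      rfl
    · rw [pvLookup, if_neg heq]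
      by_cases hc : 3 ≤ k.toList.length ∧ k.toList <+: s
      · have hlen : ¬ k.toList.length = i := by
          intro hl
          exact heq (by rw [List.prefix_iff_eq_take.mp hc.2, hl])
        rw [pvG_cons_pos rest hc,
            List.find?_cons_of_neg (by simp only [beq_iff_eq]; exact hlen)]
        exact ih
      · rw [pvG_cons_neg rest hc]
        exact ih

-- the countdown loop of A equals the max-length selection over pvG, restricted to lengths ≤ n
theorem pvLoopA_eq (m : List (String × String)) (s : List Char) :
    ∀ n, n ≤ s.length →
      pvLoopA m s n =
        (pvPickMax none ((pvG s m).filter (fun g => g.1.length ≤ n))).map (·.2) := by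
  intro n
  induction n with
  | zero =>
    intro _
    have hf : (pvG s m).filter (fun g => g.1.length ≤ 0) = [] := by
      apply List.filter_eq_nil_iff.mpr
      intro g hg
      simp only [decide_eq_true_eq, Nat.not_le]
      exact lt_of_lt_of_le (by norm_num) (pvG_mem hg).1
    rw [hf]
    rfl
  | succ n ih =>
    intro hle
    by_cases hsmall : n + 1 ≤ 2
    · have hf : (pvG s m).filter (fun g => g.1.length ≤ n + 1) = [] := by
        apply List.filter_eq_nil_iff.mpr
        intro g hg
        simp only [decide_eq_true_eq, Nat.not_le]
        exact lt_of_lt_of_le (by omega) (pvG_mem hg).1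
      rw [pvLoopA, if_pos hsmall, hf]
      rfl
    · have h3 : 3 ≤ n + 1 := by omega
      rw [pvLoopA, if_neg hsmall, pvLookup_take m h3 hle]
      cases hfind : (pvG s m).find? (fun g => g.1.length == n + 1) with
      | none =>
        have hno : ∀ g ∈ pvG s m, g.1.length ≠ n + 1 := by
          intro g hg hl
          have := List.find?_eq_none.mp hfind g hg
          simp [hl] at this
        have hfilter : (pvG s m).filter (fun g => g.1.length ≤ n + 1)
            = (pvG s m).filter (fun g => g.1.length ≤ n) := by
          apply List.filter_congr
          intro g hg
          have := hno g hg
          simp only [decide_eq_decide]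
          omega
        simpa [hfilter] using ih (by omega)
      | some g =>
        have hmem := List.mem_of_find?_eq_some hfind
        have hglen : g.1.length = n + 1 := by
          have := List.find?_some hfind; simpa using this
        have hub : ∀ h ∈ (pvG s m).filter (fun g => g.1.length ≤ n + 1), h.1.length ≤ n + 1 := by
          intro h hh
          have := List.of_mem_filter hh; simpa using this
        have hex : ∃ h ∈ (pvG s m).filter (fun g => g.1.length ≤ n + 1), h.1.length = n + 1 :=
          ⟨g, List.mem_filter.mpr ⟨hmem, by simp [hglen]⟩, hglen⟩
        rw [pvPickMax_eq_find hub hex none (by intro b hb; cases hb)]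
        rw [pvFind?_filter (by intro a ha; simp only [beq_iff_eq] at ha; simp [ha]), hfind]
        rfl

-- ===== VERDICT (by name: the statement is the Claim_ definition above) =====
theorem get_classe_spec : Claim_equal_get_classe := by
  intro atc m _
  unfold Spec_get_classe get_classe get_classe_alt
  by_cases he : atc.toList = []
  · simp [he]
  · simp only [if_neg he]
    set s := PySem.Chars.strip (PySem.Chars.upper atc.toList) with hs
    cases hx : pvLookup m s with
    | some v => rfl
    | none =>
      have hfilter : (pvG s m).filter (fun g => g.1.length ≤ s.length) = pvG s m := by
        apply List.filter_eq_self.mpr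
        intro g hg
        simp [(pvG_mem hg).2.length_le]
      have hA := pvLoopA_eq m s s.length le_rfl
      rw [hfilter] at hA
      have hB : pvFoldB s m = pvPickMax none (pvG s m) := pvFoldB_eq_pickMax s m none
      rw [hA, hB]
      cases pvPickMax none (pvG s m) with
      | none => rfl
      | some b => rfl
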